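-- pv_equiv track=rewrite | github.com/StevenXoFk/Tarea-taller-Tkinter | convertidor.py | base7_a_base15
-- ===== SOURCE A (Python) =====
-- def base7_a_base15(numero):
--     res = 0
--     exponentee = 0
--     base15 = ""
--
--
--     diles = "0123456789ABCDEF"
--
--     while numero > 0:
--         nuevo = numero % 10
--         res += nuevo * (7 ** exponentee)
--         numero //= 10
--         exponentee += 1
--
--     while res > 0:
--         todo = res % 15
--         base15 = diles[todo] + base15
--         res //= 15
--
--     return base15
-- ===== SOURCE B (Python) =====
-- def base7_a_base15(numero):
--     def rebase(n):
--         # read the decimal digits of n as base-7 digits, least significant first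
--         return 0 if n <= 0 else n % 10 + 7 * rebase(n // 10)
--
--     def to15(n):
--         return "" if n <= 0 else to15(n // 15) + "0123456789ABCDEF"[n % 15]
--
--     return to15(rebase(numero))
-- ===== Notes on version B (the rewrite author's own statement) =====
-- stated objective: simpler
-- what changed: B replaces A's two while loops (an exponent counter with 7**exp and string prepending) by two small self-recursive functions: rebase reads the decimal digits as base-7 without any power computation, and to15 builds the base-15 string most-significant-first by recursion.
import Mathlib
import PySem

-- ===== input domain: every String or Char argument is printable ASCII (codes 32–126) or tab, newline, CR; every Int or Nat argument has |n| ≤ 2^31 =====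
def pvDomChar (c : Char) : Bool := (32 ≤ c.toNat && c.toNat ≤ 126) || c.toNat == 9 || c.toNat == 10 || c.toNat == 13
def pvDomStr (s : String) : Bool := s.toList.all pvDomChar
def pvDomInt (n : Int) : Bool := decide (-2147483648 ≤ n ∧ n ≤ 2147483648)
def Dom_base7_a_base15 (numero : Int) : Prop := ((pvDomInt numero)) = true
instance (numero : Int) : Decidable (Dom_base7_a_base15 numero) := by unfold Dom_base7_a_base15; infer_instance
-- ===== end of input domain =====

-- B replaces A's two while loops by two small self-recursive functions, with no
-- power computation and no string prepending (objective: simpler).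

-- ===== PORT A =====
def pvDilesA : List Char := ['0','1','2','3','4','5','6','7','8','9','A','B','C','D','E','F']

-- first while loop of A: res += (numero % 10) * 7 ** exponentee; numero //= 10
def pvA_loop1 (numero res : Int) (exponentee : Nat) : Int :=
  if h : numero > 0 then
    pvA_loop1 (PySem.Int.floordiv numero 10)
      (res + PySem.Int.mod numero 10 * 7 ^ exponentee) (exponentee + 1)
  else res
termination_by numero.toNat
decreasing_by
  rw [PySem.Int.floordiv_eq_ediv_of_pos (by omega)]
  omega

-- second while loop of A: base15 = diles[res % 15] + base15; res //= 15
def pvA_loop2 (res : Int) (base15 : List Char) : List Char :=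
  if h : res > 0 then
    pvA_loop2 (PySem.Int.floordiv res 15)
      (PySem.List.pyGetD pvDilesA (PySem.Int.mod res 15) ' ' :: base15)
  else base15
termination_by res.toNat
decreasing_by
  rw [PySem.Int.floordiv_eq_ediv_of_pos (by omega)]
  omega

def base7_a_base15 (numero : Int) : String :=
  String.ofList (pvA_loop2 (pvA_loop1 numero 0 0) [])

-- ===== PORT B =====
-- rebase(n) = 0 if n <= 0 else n % 10 + 7 * rebase(n // 10)
-- (n > 0 throughout the recursion, so Python's % and // coincide with Int.emod/ediv here)
def pvB_rebase (n : Int) : Int :=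
  if h : n ≤ 0 then 0 else n % 10 + 7 * pvB_rebase (n / 10)
termination_by n.toNat
decreasing_by omega

-- to15(n) = "" if n <= 0 else to15(n // 15) + diles[n % 15]
def pvB_to15 (n : Int) : List Char :=
  if h : n ≤ 0 then []
  else pvB_to15 (n / 15) ++ [(['0','1','2','3','4','5','6','7','8','9','A','B','C','D','E','F']).getD (n % 15).toNat ' ']
termination_by n.toNat
decreasing_by omega

def base7_a_base15_alt (numero : Int) : String :=
  String.ofList (pvB_to15 (pvB_rebase numero))

-- ===== PRECONDITION & SPEC =====
def Spec_base7_a_base15 (numero : Int) (out : String) : Prop := out = base7_a_base15_alt numero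
instance (numero : Int) (out : String) : Decidable (Spec_base7_a_base15 numero out) := by unfold Spec_base7_a_base15; infer_instance

-- ===== CLAIM (what is proved, stated in full; the proofs are below) =====
def Claim_equal_base7_a_base15 : Prop := ∀ (numero : Int), Dom_base7_a_base15 numero → Spec_base7_a_base15 numero (base7_a_base15 numero)

-- ===== LEMMAS AND PROOFS =====

lemma pvB_rebase_pos (n : Int) (h : n > 0) :
    pvB_rebase n = n % 10 + 7 * pvB_rebase (n / 10) := by
  rw [pvB_rebase]; exact dif_neg (by omega)

lemma pvB_rebase_nonpos (n : Int) (h : n ≤ 0) : pvB_rebase n = 0 := by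
  rw [pvB_rebase]; exact dif_pos h

lemma pvA_loop1_eq (numero res : Int) (exponentee : Nat) :
    pvA_loop1 numero res exponentee = res + 7 ^ exponentee * pvB_rebase numero := by
  fun_induction pvA_loop1 numero res exponentee with
  | case1 numero res e h ih =>
    rw [ih, pvB_rebase_pos numero h,
      PySem.Int.mod_eq_emod_of_pos (by norm_num),
      PySem.Int.floordiv_eq_ediv_of_pos (by norm_num)]
    ring
  | case2 numero res e h =>
    rw [pvB_rebase_nonpos numero (by omega)]
    ring

lemma pv_digit_eq (i : Int) (h0 : 0 ≤ i) (h1 : i < 15) :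
    PySem.List.pyGetD pvDilesA i ' '
      = (['0','1','2','3','4','5','6','7','8','9','A','B','C','D','E','F']).getD i.toNat ' ' := by
  interval_cases i <;> rfl

lemma pvB_to15_pos (n : Int) (h : n > 0) :
    pvB_to15 n = pvB_to15 (n / 15)
      ++ [(['0','1','2','3','4','5','6','7','8','9','A','B','C','D','E','F']).getD (n % 15).toNat ' '] := by
  rw [pvB_to15]; exact dif_neg (by omega)

lemma pvB_to15_nonpos (n : Int) (h : n ≤ 0) : pvB_to15 n = [] := by
  rw [pvB_to15]; exact dif_pos h

lemma pvA_loop2_eq (k : Nat) : ∀ (res : Int), res.toNat ≤ k → ∀ (acc : List Char),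
    pvA_loop2 res acc = pvB_to15 res ++ acc := by
  induction k with
  | zero =>
    intro res hk acc
    have h : ¬ res > 0 := by omega
    rw [pvA_loop2, dif_neg h, pvB_to15_nonpos res (by omega)]
    simp
  | succ k ih =>
    intro res hk acc
    by_cases h : res > 0
    · have hlt : (PySem.Int.floordiv res 15).toNat ≤ k := by
        rw [PySem.Int.floordiv_eq_ediv_of_pos (by omega)]
        omega
      have hm0 : 0 ≤ PySem.Int.mod res 15 := by
        rw [PySem.Int.mod_eq_emod_of_pos (by norm_num)]
        exact Int.emod_nonneg res (by norm_num)
      have hm1 : PySem.Int.mod res 15 < 15 := by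
        rw [PySem.Int.mod_eq_emod_of_pos (by norm_num)]
        exact Int.emod_lt_of_pos res (by norm_num)
      rw [pvA_loop2, dif_pos h, ih _ hlt, pvB_to15_pos res h,
        pv_digit_eq _ hm0 hm1,
        PySem.Int.floordiv_eq_ediv_of_pos (by norm_num),
        PySem.Int.mod_eq_emod_of_pos (by norm_num)]
      simp
    · rw [pvA_loop2, dif_neg h, pvB_to15_nonpos res (by omega)]
      simp

-- ===== VERDICT (by name: the statement is the Claim_ definition above) =====
theorem base7_a_base15_spec : Claim_equal_base7_a_base15 := by
  intro numero _
  unfold Spec_base7_a_base15 base7_a_base15 base7_a_base15_alt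
  rw [pvA_loop1_eq numero 0 0,
    pvA_loop2_eq (pvB_rebase numero).toNat _ (by simp) []]
  simp
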